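-- pv_equiv track=rewrite | github.com/Peilonrayz/Stack-Exchange-contributions | code-review/219818/src/se_code/final/__init__.py | largest_sorted
-- ===== SOURCE A (Python) =====
-- def largest_sorted(values):
--     if not values:
--         return []
--     values = sorted(values, reverse=True)
--     value = values[0]
--     for i, v in enumerate(values):
--         if value != v:
--             return [value] * i
--     return values
-- ===== SOURCE B (Python) =====
-- def largest_sorted(values):
--     if not values:
--         return []
--     m = max(values)
--     return [m] * values.count(m)
-- ===== Notes on version B (the rewrite author's own statement) =====
-- stated objective: simpler
-- what changed: B never sorts: it takes max(values) in one linear pass and counts its occurrences in a second, returning [m]*count, instead of A's sort-descending-then-scan-for-the-first-smaller-element loop.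
import Mathlib
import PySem

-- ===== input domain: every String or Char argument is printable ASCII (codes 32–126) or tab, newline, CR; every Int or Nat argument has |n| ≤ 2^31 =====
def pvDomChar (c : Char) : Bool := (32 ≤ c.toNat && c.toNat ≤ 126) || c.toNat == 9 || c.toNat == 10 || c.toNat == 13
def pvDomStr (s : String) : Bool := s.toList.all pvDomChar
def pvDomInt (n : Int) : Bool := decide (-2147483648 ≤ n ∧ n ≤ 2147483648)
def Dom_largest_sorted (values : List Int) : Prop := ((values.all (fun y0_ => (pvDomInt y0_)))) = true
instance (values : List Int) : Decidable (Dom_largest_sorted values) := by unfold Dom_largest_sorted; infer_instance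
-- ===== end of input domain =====

-- B replaces A's sort-then-prefix-scan by two independent linear passes (max, then count); simpler and asymptotically faster.

-- ===== PORT A =====
-- the 'for i, v in enumerate(values)' loop: early return '[value] * i' at the first mismatch, else the whole sorted list
def lsLoop (value : Int) (vsAll : List Int) : Nat → List Int → List Int
  | i, v :: rest => if value ≠ v then PySem.List.pyRepeat [value] (i : Int) else lsLoop value vsAll (i + 1) rest
  | _, [] => vsAll

def largest_sorted (values : List Int) : List Int :=
  if values = [] then []
  else
    let vs := PySem.List.sorted values (fun x => x) true
    -- values[0]: vs is nonempty here, so pyGet? is some; .getD 0 only discharges the option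
    let value := (PySem.List.pyGet? vs 0).getD 0
    lsLoop value vs 0 vs

-- ===== PORT B =====
def largest_sorted_alt (values : List Int) : List Int :=
  if values = [] then []
  else
    -- max(values): nonempty here, so max? is some
    let m := (PySem.List.max? values (fun x => x)).getD 0
    PySem.List.pyRepeat [m] ((PySem.List.count values m : Int))

-- ===== PRECONDITION & SPEC =====
def Spec_largest_sorted (values : List Int) (out : List Int) : Prop := out = largest_sorted_alt values
instance (values : List Int) (out : List Int) : Decidable (Spec_largest_sorted values out) := by unfold Spec_largest_sorted; infer_instance

-- ===== CLAIM (what is proved, stated in full; the proofs are below) =====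
def Claim_equal_largest_sorted : Prop := ∀ (values : List Int), Dom_largest_sorted values → Spec_largest_sorted values (largest_sorted values)

-- ===== LEMMAS AND PROOFS =====

-- On a suffix l all of whose elements are ≤ value and weakly descending:
-- the loop returns vsAll if every element of l equals value, else a replicate.
theorem lsLoop_char (value : Int) (vsAll : List Int) (i : Nat) (l : List Int)
    (hle : ∀ x ∈ l, x ≤ value) (hd : l.Pairwise (fun a b => b ≤ a)) :
    lsLoop value vsAll i l =
      if l.count value = l.length then vsAll
      else List.replicate (i + l.count value) value := by
  induction l generalizing i with
  | nil => simp [lsLoop]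
  | cons v rest ih =>
    by_cases hv : value = v
    · subst hv
      have hle' : ∀ x ∈ rest, x ≤ value := fun x hx => hle x (List.mem_cons_of_mem _ hx)
      rw [lsLoop]
      simp only [ne_eq, not_true_eq_false, reduceIte]
      rw [ih (i + 1) hle' (List.pairwise_cons.mp hd).2]
      simp only [List.count_cons_self, List.length_cons]
      by_cases hall : rest.count value = rest.length
      · simp [hall]
      · have : ¬ (rest.count value + 1 = rest.length + 1) := by omega
        simp only [hall, this, reduceIte]
        congr 1
        omega
    · -- first mismatch: v < value, and every later element ≤ v < value ⇒ count value rest = 0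
      have hvlt : v < value := lt_of_le_of_ne (hle v (List.mem_cons_self)) (fun h => hv h.symm)
      have hrest : ∀ x ∈ rest, x ≤ v := (List.pairwise_cons.mp hd).1
      have hcount : rest.count value = 0 := by
        rw [List.count_eq_zero]
        intro hmem
        exact absurd (hrest value hmem) (not_le.mpr hvlt)
      rw [lsLoop]
      have hvne : value ≠ v := hv
      rw [if_pos hvne]
      have hcnt : (v :: rest).count value = 0 := by
        simp only [List.count_cons, hcount, Nat.zero_add]
        exact if_neg (by simpa using fun h : v = value => hv h.symm)
      rw [hcnt, if_neg (by simp), PySem.List.pyRepeat_singleton]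
      simp

-- ===== VERDICT (by name: the statement is the Claim_ definition above) =====
theorem largest_sorted_spec : Claim_equal_largest_sorted := by
  intro values _
  unfold Spec_largest_sorted largest_sorted largest_sorted_alt
  by_cases hnil : values = []
  · simp [hnil]
  · simp only [hnil, reduceIte]
    obtain ⟨v0, t, hvs⟩ : ∃ v0 t, PySem.List.sorted values (fun x => x) true = v0 :: t := by
      rcases h : PySem.List.sorted values (fun x => x) true with _ | ⟨v0, t⟩
      · exact absurd ((PySem.List.sorted_eq_nil_iff values _ true).mp h) hnil
      · exact ⟨v0, t, rfl⟩
    have hmemvs : ∀ x, x ∈ PySem.List.sorted values (fun x => x) true ↔ x ∈ values :=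
      fun x => PySem.List.mem_sorted values _ true x
    have hv0mem : v0 ∈ values := (hmemvs v0).mp (hvs ▸ List.mem_cons_self)
    have hv0max : ∀ y ∈ values, y ≤ v0 := PySem.List.key_head_sorted_rev_ge values (fun x => x) hvs
    -- max(values) equals v0
    obtain ⟨m0, hm0⟩ : ∃ m0, PySem.List.max? values (fun x => x) = some m0 := by
      rcases h : PySem.List.max? values (fun x => x) with _ | m0
      · exact absurd ((PySem.List.max?_eq_none_iff values _).mp h) hnil
      · exact ⟨m0, rfl⟩
    have hm0v0 : m0 = v0 :=
      le_antisymm (hv0max m0 (PySem.List.max?_mem hm0)) (PySem.List.max?_isMax hm0 v0 hv0mem)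
    have hget : (PySem.List.pyGet? (PySem.List.sorted values (fun x => x) true) 0).getD 0 = v0 := by
      rw [hvs]; simp [PySem.List.pyGet?, PySem.List.pyIdx?]
    have hperm : (PySem.List.sorted values (fun x => x) true).Perm values :=
      PySem.List.sorted_perm values _ true
    have hcnteq : (PySem.List.sorted values (fun x => x) true).count v0 = values.count v0 :=
      hperm.count_eq v0
    have hdesc : (PySem.List.sorted values (fun x => x) true).Pairwise (fun a b => b ≤ a) :=
      PySem.List.sorted_pairwise_rev values _
    have hle : ∀ x ∈ PySem.List.sorted values (fun x => x) true, x ≤ v0 :=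
      fun x hx => hv0max x ((hmemvs x).mp hx)
    rw [hget, lsLoop_char v0 _ 0 _ hle hdesc, hm0, Option.getD_some, hm0v0,
      PySem.List.count_eq, PySem.List.pyRepeat_singleton]
    by_cases hall : (PySem.List.sorted values (fun x => x) true).count v0 =
        (PySem.List.sorted values (fun x => x) true).length
    · rw [if_pos hall]
      have := List.count_eq_length.mp hall
      have hrep : PySem.List.sorted values (fun x => x) true =
          List.replicate (PySem.List.sorted values (fun x => x) true).length v0 :=
        List.eq_replicate_iff.mpr ⟨rfl, fun b hb => (this b hb).symm⟩
      rw [hrep]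
      congr 1
      omega
    · rw [if_neg hall]
      congr 1
      omega
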